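-- pv_equiv track=rewrite | github.com/ericmerle3789/Collatz-Junction-Theorem | scripts/exploration/phase_a1_exhaustive_k18_25.py | count_N0_enum
-- ===== SOURCE A (Python) =====
-- import math
-- import itertools
-- from collections import Counter
--
-- MAX_ENUM_C = 3 * 10**7     # C max pour énumération directe
--
-- def compositions_gen(S, k):
--     """Génère les positions A = (0, c₁, ..., c_{k-1}) avec 0 < c₁ < ... < c_{k-1} ≤ S-1."""
--     if k == 1:
--         yield (0,)
--         return
--     for combo in itertools.combinations(range(1, S), k - 1):
--         yield (0,) + combo
--
-- def corrsum_horner_mod(A, p):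
--     """corrSum(A) mod p par récurrence de Horner."""
--     c = 1  # c₀ = 2^{A[0]} = 2^0 = 1
--     for j in range(1, len(A)):
--         c = (3 * c + pow(2, A[j], p)) % p
--     return c
--
-- def count_N0_enum(S, k, p):
--     """N₀(p) par énumération directe. Retourne (N0, C_check, dist_Counter)."""
--     C = math.comb(S - 1, k - 1)
--     if C > MAX_ENUM_C:
--         return None, C, None
--
--     dist = Counter()
--     for A in compositions_gen(S, k):
--         r = corrsum_horner_mod(A, p)
--         dist[r] += 1
--
--     return dist.get(0, 0), sum(dist.values()), dist
-- ===== SOURCE B (Python) =====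
-- import math
-- from collections import Counter
--
-- MAX_ENUM_C = 3 * 10**7     # same feasibility cap as the original
--
--
-- def count_N0_enum(S, k, p):
--     """N0(p) by an explicit-stack DFS over increasing positions that carries the
--     partial Horner residue, so each composition is extended in O(1) and shared
--     prefixes are evaluated once (no tuple materialisation, no per-tuple Horner pass)."""
--     C = math.comb(S - 1, k - 1)
--     if C > MAX_ENUM_C:
--         return None, C, None
--
--     dist = Counter()
--     # frame (v, rem, c): next candidate position v, rem positions still to pick,
--     # c = Horner residue of the prefix chosen so far (c0 = 2^0 = 1).
--     stack = [(1, k - 1, 1)]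
--     while stack:
--         v, rem, c = stack.pop()
--         if rem == 0:
--             dist[c] += 1
--         elif v <= S - rem:
--             stack.append((v + 1, rem, c))                       # siblings: skip v
--             stack.append((v + 1, rem - 1, (3 * c + pow(2, v, p)) % p))  # take v
--
--     return dist.get(0, 0), sum(dist.values()), dist
-- ===== Notes on version B (the rewrite author's own statement) =====
-- stated objective: alternative
-- what changed: Replaces the combinations generator plus a separate per-composition Horner pass by a single explicit-stack DFS over positions that carries the partial Horner residue, so each composition is extended in O(1) from a shared prefix instead of being materialised as a tuple and re-folded.
-- outside the precondition, e.g. on count_N0_enum(30000002, 2, 0): A returns (None, 30000001, None), B returns (None, 30000001, None)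
import Mathlib
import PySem

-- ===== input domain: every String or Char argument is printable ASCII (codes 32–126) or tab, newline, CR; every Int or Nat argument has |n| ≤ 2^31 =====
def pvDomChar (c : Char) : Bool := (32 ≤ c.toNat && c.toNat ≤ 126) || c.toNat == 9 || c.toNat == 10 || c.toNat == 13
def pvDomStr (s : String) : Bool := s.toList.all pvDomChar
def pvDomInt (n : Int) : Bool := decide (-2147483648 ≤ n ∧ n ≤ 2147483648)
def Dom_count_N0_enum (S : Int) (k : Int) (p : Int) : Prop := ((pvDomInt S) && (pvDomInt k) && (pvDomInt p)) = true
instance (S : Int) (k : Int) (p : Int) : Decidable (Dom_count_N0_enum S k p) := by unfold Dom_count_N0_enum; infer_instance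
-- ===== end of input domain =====

-- B replaces A's combinations-generator + per-tuple Horner pass by one explicit-stack DFS
-- carrying the partial Horner residue (same results, prefixes shared; measured constant-factor faster on deep k).

-- ===== PORT A =====

-- math.comb(n, r), ported by the exact multiplicative recurrence C(n,i+1) = C(n,i)*(n-i)/(i+1)
-- (each division is exact; 0 for r > n), since Mathlib's Nat.choose is not efficiently evaluable
def pvComb (n : Nat) (r : Nat) : Nat :=
  (List.range r).foldl (fun acc i => acc * (n - i) / (i + 1)) 1

-- pow(2, a, p); in every call the exponent a is a position from range(1, S), so a ≥ 1 and toNat is exact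
def pvPow2Mod (a p : Int) : Int := PySem.Int.powMod 2 a.toNat p

-- corrsum_horner_mod: c = 1; for j in range(1, len(A)): c = (3*c + pow(2, A[j], p)) % p
-- (the loop over indices 1..len(A)-1 reading A[j] is the fold over A.drop 1, cf. PySem.List.foldl_pyRange_pyGetD)
def corrsum_horner_mod (A : List Int) (p : Int) : Int :=
  (A.drop 1).foldl (fun c a => PySem.Int.mod (3 * c + pvPow2Mod a p) p) 1

-- compositions_gen: (0,) if k == 1, else (0,) + combo for combo in combinations(range(1, S), k-1)
def compositions_gen (S : Int) (k : Int) : List (List Int) :=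
  if k = 1 then [[0]]
  else (PySem.List.combinations (PySem.List.pyRange 1 S 1) (k - 1).toNat).map (fun c => 0 :: c)

def count_N0_enum (S : Int) (k : Int) (p : Int) : Option Int × Int × (Option (List (Int × Int))) :=
  let C : Int := (pvComb (S - 1).toNat (k - 1).toNat : Int)   -- math.comb(S-1, k-1); Pre_ gives S ≥ 1, k ≥ 1
  if 3 * 10 ^ 7 < C then (none, C, none)
  else
    let dist := (compositions_gen S k).foldl
      (fun d A => d.modify (corrsum_horner_mod A p) 0 (· + 1)) PySem.Dict.empty
    (some (dist.getD 0 0), dist.values.sum, some dist.items)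

-- ===== PORT B =====

-- termination measure for the DFS stack of Source B, and its decrease facts (cited by decreasing_by)
def pvFrameW (S : Int) (f : Int × Int × Int) : Nat := 2 ^ ((S - f.1 + f.2.1 + 1).toNat)

theorem pvDec_drop (S : Int) (v rem c : Int) (st : List (Int × Int × Int)) :
    (st.map (pvFrameW S)).sum < (((v, rem, c) :: st).map (pvFrameW S)).sum := by
  have hp : 0 < pvFrameW S (v, rem, c) := Nat.two_pow_pos _
  simp only [List.map_cons, List.sum_cons]
  omega

theorem pvDec_push (S : Int) (v rem c c' : Int) (st : List (Int × Int × Int))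
    (h1 : 0 < rem) (h2 : v ≤ S - rem) :
    ((((v + 1, rem - 1, c') :: (v + 1, rem, c) :: st)).map (pvFrameW S)).sum
      < (((v, rem, c) :: st).map (pvFrameW S)).sum := by
  simp only [List.map_cons, List.sum_cons, pvFrameW]
  have h2' : (S - (v + 1) + (rem - 1) + 1).toNat + 2 = (S - v + rem + 1).toNat := by omega
  have h1' : (S - (v + 1) + rem + 1).toNat + 1 = (S - v + rem + 1).toNat := by omega
  have e2 : (2:ℕ) ^ (S - (v + 1) + (rem - 1) + 1).toNat * 4 = 2 ^ (S - v + rem + 1).toNat := by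
    rw [← h2', pow_add]; ring
  have e1 : (2:ℕ) ^ (S - (v + 1) + rem + 1).toNat * 2 = 2 ^ (S - v + rem + 1).toNat := by
    rw [← h1', pow_add]; ring
  have hp : 0 < (2:ℕ) ^ (S - (v + 1) + (rem - 1) + 1).toNat := Nat.two_pow_pos _
  omega

-- the while-stack loop of Source B; frame (v, rem, c) as in Source B.  The 'rem < 0' branch is a
-- totality guard only: Python never reaches the loop with k - 1 < 0 (math.comb raised before it).
def pvBStep (S : Int) (p : Int) : List (Int × Int × Int) → PySem.Dict Int Int → PySem.Dict Int Int
  | [], dist => dist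
  | (v, rem, c) :: st, dist =>
    if hr0 : rem = 0 then pvBStep S p st (dist.modify c 0 (· + 1))
    else if hrn : rem < 0 then pvBStep S p st dist
    else if h : v ≤ S - rem then
      pvBStep S p ((v + 1, rem - 1, PySem.Int.mod (3 * c + pvPow2Mod v p) p) :: (v + 1, rem, c) :: st) dist
    else pvBStep S p st dist
  termination_by st _ => (st.map (pvFrameW S)).sum
  decreasing_by
  · exact pvDec_drop S v rem c st
  · exact pvDec_drop S v rem c st
  · exact pvDec_push S v rem c _ st (by omega) h
  · exact pvDec_drop S v rem c st

def count_N0_enum_alt (S : Int) (k : Int) (p : Int) : Option Int × Int × (Option (List (Int × Int))) :=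
  let C : Int := (pvComb (S - 1).toNat (k - 1).toNat : Int)
  if 3 * 10 ^ 7 < C then (none, C, none)
  else
    let dist := pvBStep S p [(1, k - 1, 1)] PySem.Dict.empty
    (some (dist.getD 0 0), dist.values.sum, some dist.items)

-- ===== PRECONDITION & SPEC =====

-- math.comb(S-1, k-1) raises ValueError unless S ≥ 1 and k ≥ 1, and pow(2, ·, 0) raises ValueError
-- whenever p = 0 and the enumeration visits a composition with a position (k ≥ 2 and k ≤ S); for a
-- cheaply checkable condition Pre_ also excludes the p = 0 inputs whose huge C short-circuits A to
-- (None, C, None) before any pow call (A and B agree there).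
def Pre_count_N0_enum (S : Int) (k : Int) (p : Int) : Prop :=
  1 ≤ S ∧ 1 ≤ k ∧ (p = 0 → k = 1 ∨ S < k)
instance (S : Int) (k : Int) (p : Int) : Decidable (Pre_count_N0_enum S k p) := by
  unfold Pre_count_N0_enum; infer_instance

def pvWitness_count_N0_enum : Int × Int × Int := (6, 3, 5)

def Spec_count_N0_enum (S : Int) (k : Int) (p : Int) (out : Option Int × Int × (Option (List (Int × Int)))) : Prop := out = count_N0_enum_alt S k p
instance (S : Int) (k : Int) (p : Int) (out : Option Int × Int × (Option (List (Int × Int)))) : Decidable (Spec_count_N0_enum S k p out) := by unfold Spec_count_N0_enum; infer_instance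

-- ===== CLAIM (what is proved, stated in full; the proofs are below) =====
def Claim_equal_count_N0_enum : Prop := ∀ (S : Int) (k : Int) (p : Int), Dom_count_N0_enum S k p → Pre_count_N0_enum S k p → Spec_count_N0_enum S k p (count_N0_enum S k p)

-- ===== LEMMAS AND PROOFS =====

-- residues, in order, of all completions of a prefix with residue c choosing rem positions from [v, S)
def pvLeaves (S p : Int) (v : Int) (rem : Nat) (c : Int) : List Int :=
  (PySem.List.combinations (PySem.List.pyRange v S 1) rem).map
    (fun A => A.foldl (fun acc a => PySem.Int.mod (3 * acc + pvPow2Mod a p) p) c)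

lemma pvLeaves_zero (S p v c : Int) : pvLeaves S p v 0 c = [c] := by
  simp [pvLeaves, PySem.List.combinations_zero]

lemma pvLeaves_cons (S p : Int) (v c : Int) (n : Nat) (hv : v < S) :
    pvLeaves S p v (n + 1) c
      = pvLeaves S p (v + 1) n (PySem.Int.mod (3 * c + pvPow2Mod v p) p)
        ++ pvLeaves S p (v + 1) (n + 1) c := by
  unfold pvLeaves
  rw [PySem.List.pyRange_one_cons hv, PySem.List.combinations_cons_succ]
  simp [List.map_map, Function.comp_def]

lemma pvLeaves_nil (S p : Int) (v c : Int) (n : Nat) (hn : (S - v).toNat < n) :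
    pvLeaves S p v n c = [] := by
  have hlen : (PySem.List.pyRange v S 1).length < n := by
    rw [PySem.List.length_pyRange_one]; omega
  simp [pvLeaves, PySem.List.combinations_eq_nil_of_length_lt _ hlen]

-- one stack frame processes exactly the counter updates of its leaves, in lex order
lemma pvBStep_frame (S p : Int) :
    ∀ N (rem v c : Int) (st : List (Int × Int × Int)) (dist : PySem.Dict Int Int),
      0 ≤ rem → (rem + rem + (S - v)).toNat ≤ N →
      pvBStep S p ((v, rem, c) :: st) dist =
        pvBStep S p st
          ((pvLeaves S p v rem.toNat c).foldl (fun d r => d.modify r 0 (· + 1)) dist) := by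
  intro N
  induction N using Nat.strong_induction_on with
  | _ N ih =>
  intro rem v c st dist h0 hN
  rcases eq_or_lt_of_le h0 with h0' | hpos
  · rw [← h0', pvBStep]
    simp [pvLeaves_zero]
  · by_cases hv : v ≤ S - rem
    · have hvS : v < S := by omega
      have hn : rem.toNat = (rem - 1).toNat + 1 := by omega
      rw [pvBStep]
      simp only [dif_neg (show ¬ rem = 0 by omega), dif_neg (show ¬ rem < 0 by omega), dif_pos hv]
      have hNpos : 1 ≤ N := by omega
      rw [ih (N - 1) (by omega) (rem - 1) (v + 1) _ _ _ (by omega) (by omega)]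
      rw [ih (N - 1) (by omega) rem (v + 1) _ _ _ (by omega) (by omega)]
      rw [hn, pvLeaves_cons S p v c ((rem - 1).toNat) hvS, List.foldl_append]
    · rw [pvBStep]
      simp only [dif_neg (show ¬ rem = 0 by omega), dif_neg (show ¬ rem < 0 by omega), dif_neg hv]
      rw [pvLeaves_nil S p v c rem.toNat (by omega), List.foldl_nil]

theorem pv_main (S k p : Int) (hk : 1 ≤ k) :
    count_N0_enum S k p = count_N0_enum_alt S k p := by
  unfold count_N0_enum count_N0_enum_alt
  by_cases hC : 3 * 10 ^ 7 < ((pvComb (S - 1).toNat (k - 1).toNat : Nat) : Int)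
  · simp only [if_pos hC]
  · simp only [if_neg hC]
    have hnil : pvBStep S p [] ((pvLeaves S p 1 (k - 1).toNat 1).foldl (fun d r => d.modify r 0 (· + 1)) PySem.Dict.empty) = (pvLeaves S p 1 (k - 1).toNat 1).foldl (fun d r => d.modify r 0 (· + 1)) PySem.Dict.empty := by rw [pvBStep]
    have hb := pvBStep_frame S p ((k - 1) + (k - 1) + (S - 1)).toNat (k - 1) 1 1 [] PySem.Dict.empty (by omega) (le_refl _)
    rw [hnil] at hb
    have hd : (compositions_gen S k).foldl
        (fun d A => d.modify (corrsum_horner_mod A p) 0 (· + 1)) PySem.Dict.empty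
        = pvBStep S p [(1, k - 1, 1)] PySem.Dict.empty := by
      rw [hb]
      by_cases hk1 : k = 1
      · subst hk1
        simp [compositions_gen, pvLeaves_zero, corrsum_horner_mod]
      · unfold compositions_gen pvLeaves
        rw [if_neg hk1, List.foldl_map, List.foldl_map]
        simp only [corrsum_horner_mod, List.drop_succ_cons, List.drop_zero]
    rw [hd]

-- ===== VERDICT (by name: the statement is the Claim_ definition above) =====
theorem count_N0_enum_spec : Claim_equal_count_N0_enum := by
  intro S k p _ hpre
  unfold Spec_count_N0_enum
  exact pv_main S k p hpre.2.1
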